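-- pv_equiv track=rewrite | github.com/jano31415/codejam | codeforces/815_round_div2/probc.py | solve
-- ===== SOURCE A (Python) =====
-- def solve(n, m, grid):
--     max_moves = sum([sum(row) for row in grid])
--     if max_moves == n*m:
--         return max_moves-2
--
--     if max_moves == 0:
--         return 0
--     for row in grid:
--         for i in range(len(row)):
--             if i != len(row)-1:
--                 if row[i] == 0 and row[i+1] == 0:
--                     return max_moves
--     for i in range(len(grid)):
--         if i != len(grid) - 1:
--             for j in range(m):
--                 if grid[i][j] == 0 and grid[i+1][j] == 0:
--                     return max_moves
--
--     for i in range(len(grid)):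
--         if i != len(grid) - 1:
--             for j in range(m):
--                 if j != m-1:
--                     if grid[i][j+1] == 0 and grid[i + 1][j] == 0:
--                         return max_moves
--                     if grid[i][j] == 0 and grid[i + 1][j+1] == 0:
--                         return max_moves
--     return max_moves-1
-- ===== SOURCE B (Python) =====
-- def solve(n, m, grid):
--     total = sum(map(sum, grid))
--     if total == n * m:
--         return total - 2
--     if total == 0:
--         return 0
--     prev = 0
--     for row in grid:
--         z = 0
--         for v in reversed(row):
--             z = 2 * z + (1 if v == 0 else 0)
--         if z & (z >> 1):
--             return total
--         if z & (prev | (prev << 1) | (prev >> 1)):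
--             return total
--         prev = z
--     return total - 1
-- ===== Notes on version B (the rewrite author's own statement) =====
-- stated objective: alternative
-- what changed: Replaces A's three directional index-scanning passes by encoding each row's empty cells as an integer bitmask and detecting king-adjacent empty pairs with word-parallel bitwise tests (z & z>>1 for horizontal, z & (prev | prev<<1 | prev>>1) for vertical/diagonal) in a single streaming pass keeping only the previous row's mask.
-- outside the precondition, e.g. on solve(2, 1, [[1, 0], [5, 0]]): A returns 5, B returns 6; on solve(2, 3, [[0, 1], [1, 0]]): A raises IndexError, B returns 2
import Mathlib
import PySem

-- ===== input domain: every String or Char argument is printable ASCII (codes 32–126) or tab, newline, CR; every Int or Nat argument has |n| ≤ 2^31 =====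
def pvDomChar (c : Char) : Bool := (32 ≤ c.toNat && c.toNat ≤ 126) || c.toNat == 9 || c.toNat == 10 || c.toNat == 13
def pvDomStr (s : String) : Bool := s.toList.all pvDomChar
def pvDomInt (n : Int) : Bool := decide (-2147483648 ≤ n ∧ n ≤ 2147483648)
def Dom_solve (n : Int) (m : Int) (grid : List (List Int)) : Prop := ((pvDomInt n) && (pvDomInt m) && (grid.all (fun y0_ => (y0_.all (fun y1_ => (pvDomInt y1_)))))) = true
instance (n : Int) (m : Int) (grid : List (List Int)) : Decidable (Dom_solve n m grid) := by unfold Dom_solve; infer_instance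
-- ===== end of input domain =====

-- B replaces A's three directional index-scanning passes by per-row zero bitmasks and
-- word-parallel bitwise adjacency tests in one streaming pass (objective: alternative).

-- ===== PORT A =====
-- A's first loop: for row in grid: for i in range(len(row)): adjacent horizontal empty pair
def pvScanH (grid : List (List Int)) : Bool :=
  grid.any fun row =>
    (List.range row.length).any fun i =>
      i != row.length - 1 && (row.getD i 0 == 0 && row.getD (i + 1) 0 == 0)

-- A's second loop: for i in range(len(grid)): for j in range(m): vertical empty pair
def pvScanV (m : Int) (grid : List (List Int)) : Bool :=
  (List.range grid.length).any fun i =>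
    i != grid.length - 1 &&
      (PySem.List.pyRange 0 m 1).any fun j =>
        PySem.List.pyGetD (grid.getD i []) j 0 == 0 &&
        PySem.List.pyGetD (grid.getD (i + 1) []) j 0 == 0

-- A's third loop: both diagonal empty pairs
def pvScanD (m : Int) (grid : List (List Int)) : Bool :=
  (List.range grid.length).any fun i =>
    i != grid.length - 1 &&
      (PySem.List.pyRange 0 m 1).any fun j =>
        j != m - 1 &&
          ((PySem.List.pyGetD (grid.getD i []) (j + 1) 0 == 0 &&
            PySem.List.pyGetD (grid.getD (i + 1) []) j 0 == 0) ||
           (PySem.List.pyGetD (grid.getD i []) j 0 == 0 &&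
            PySem.List.pyGetD (grid.getD (i + 1) []) (j + 1) 0 == 0))

def solve (n : Int) (m : Int) (grid : List (List Int)) : Int :=
  let max_moves := (grid.map (fun row => row.foldl (· + ·) 0)).foldl (· + ·) 0
  if max_moves = n * m then max_moves - 2
  else if max_moves = 0 then 0
  else if pvScanH grid then max_moves
  else if pvScanV m grid then max_moves
  else if pvScanD m grid then max_moves
  else max_moves - 1

-- ===== PORT B =====
-- Source B's inner loop: z = 0; for v in reversed(row): z = 2*z + (1 if v == 0 else 0)
def pvRowMask (row : List Int) : Nat :=
  row.reverse.foldl (fun z v => 2 * z + (if v = 0 then 1 else 0)) 0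

-- Source B's main loop with early returns, carrying the previous row's mask
def pvBitScan (prev : Nat) (rows : List (List Int)) : Bool :=
  match rows with
  | [] => false
  | row :: rest =>
    let z := pvRowMask row
    if z &&& (z >>> 1) ≠ 0 then true
    else if z &&& (prev ||| (prev <<< 1) ||| (prev >>> 1)) ≠ 0 then true
    else pvBitScan z rest

def solve_alt (n : Int) (m : Int) (grid : List (List Int)) : Int :=
  let total := (grid.map List.sum).sum
  if total = n * m then total - 2
  else if total = 0 then 0
  else if pvBitScan 0 grid then total
  else total - 1

-- ===== PRECONDITION & SPEC =====
-- input-shape conditions used by Pre_solve (independent of both ports)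
-- cell (i, j) exists in the grid and is empty
def pvZero (grid : List (List Int)) (i j : Nat) : Prop :=
  j < (grid[i]?.getD []).length ∧ (grid[i]?.getD []).getD j 0 = 0

-- some row contains two horizontally adjacent empty cells
def pvHPair (grid : List (List Int)) : Prop :=
  ∃ i < grid.length, ∃ k < grid.flatten.length, pvZero grid i k ∧ pvZero grid i (k + 1)

-- a vertically or diagonally adjacent pair of empty cells, both in columns < w
def pvVPair (w : Nat) (grid : List (List Int)) : Prop :=
  ∃ i < grid.length, ∃ j1 < w, ∃ j2 < w,
    j1 ≤ j2 + 1 ∧ j2 ≤ j1 + 1 ∧ pvZero grid i j1 ∧ pvZero grid (i + 1) j2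

-- Pre_ excludes non-rectangular inputs on which A's fixed-width vertical/diagonal
-- scan of the first m columns raises IndexError on a row narrower than m, or on
-- which the only vertical/diagonal empty pair lies in columns ≥ m of wider rows so
-- A ignores it; it admits every input that returns before those loops, every grid
-- of rows exactly m wide, and wide-row grids whose pairs A's scan still sees.
def Pre_solve (n : Int) (m : Int) (grid : List (List Int)) : Prop :=
  grid.flatten.sum = n * m ∨ grid.flatten.sum = 0 ∨ grid.length ≤ 1 ∨ pvHPair grid ∨
    (∀ row ∈ grid, (row.length : Int) = m) ∨
    ((∀ row ∈ grid, m ≤ (row.length : Int)) ∧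
      (pvVPair m.toNat grid ∨ ¬ pvVPair grid.flatten.length grid))
instance (n : Int) (m : Int) (grid : List (List Int)) : Decidable (Pre_solve n m grid) := by
  unfold Pre_solve pvHPair pvVPair pvZero; infer_instance

def pvWitness_solve : Int × Int × List (List Int) := (2, 2, [[1, 0], [1, 1]])

def Spec_solve (n : Int) (m : Int) (grid : List (List Int)) (out : Int) : Prop := out = solve_alt n m grid
instance (n : Int) (m : Int) (grid : List (List Int)) (out : Int) : Decidable (Spec_solve n m grid out) := by unfold Spec_solve; infer_instance

-- ===== CLAIM (what is proved, stated in full; the proofs are below) =====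
def Claim_equal_solve : Prop := ∀ (n : Int) (m : Int) (grid : List (List Int)), Dom_solve n m grid → Pre_solve n m grid → Spec_solve n m grid (solve n m grid)

-- ===== LEMMAS AND PROOFS =====

theorem pv_getD_mem (grid : List (List Int)) (i : Nat) (hi : i < grid.length) :
    grid.getD i [] ∈ grid := by
  rw [List.getD_eq_getElem _ _ hi]; exact List.getElem_mem hi

theorem pv_pyGetD_nonneg (row : List Int) (z : Int) (hz : 0 ≤ z) :
    PySem.List.pyGetD row z 0 = row.getD z.toNat 0 := by
  have h := PySem.List.pyGetD_natCast (xs := row) (n := z.toNat) (d := 0)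
  rwa [Int.toNat_of_nonneg hz] at h

theorem pv_row_eq (grid : List (List Int)) (i : Nat) :
    (grid[i]?.getD []) = grid.getD i [] := by
  rw [List.getD_eq_getElem?_getD]

theorem pv_zero_iff (grid : List (List Int)) (i j : Nat) :
    pvZero grid i j ↔ j < (grid.getD i []).length ∧ (grid.getD i []).getD j 0 = 0 := by
  rw [pvZero, pv_row_eq]

theorem pv_zero_lt (grid : List (List Int)) (i j : Nat) (h : pvZero grid i j) :
    i < grid.length := by
  by_contra hc
  obtain ⟨h1, -⟩ := h
  rw [List.getElem?_eq_none (by omega)] at h1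
  simp at h1

theorem pv_len_le (grid : List (List Int)) (i : Nat) (hi : i < grid.length) :
    (grid.getD i []).length ≤ grid.flatten.length := by
  rw [List.length_flatten]
  exact List.single_le_sum (fun _ _ => Nat.zero_le _) _
    (List.mem_map_of_mem (pv_getD_mem grid i hi))

theorem pv_sum_eq (grid : List (List Int)) :
    (grid.map (fun row => row.foldl (· + ·) 0)).foldl (· + ·) 0 = grid.flatten.sum := by
  simp [← List.sum_eq_foldl, List.sum_flatten]

theorem pv_sum_eq_b (grid : List (List Int)) :
    (grid.map List.sum).sum = grid.flatten.sum := by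
  rw [List.sum_flatten]

theorem pv_scanH_iff (grid : List (List Int)) :
    pvScanH grid = true ↔ pvHPair grid := by
  simp only [pvScanH, pvHPair, List.any_eq_true, List.mem_range, Bool.and_eq_true,
    bne_iff_ne, beq_iff_eq]
  constructor
  · rintro ⟨row, hrow, k, hk, hne, h0, h1⟩
    obtain ⟨i, hi, hieq⟩ := List.mem_iff_getElem.mp hrow
    have hg : grid.getD i [] = row := by rw [List.getD_eq_getElem _ _ hi]; exact hieq
    have hle := pv_len_le grid i hi
    have hlg : (grid.getD i []).length = row.length := by rw [hg]
    refine ⟨i, hi, k, by omega, ?_, ?_⟩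
    · exact (pv_zero_iff grid i k).mpr ⟨by omega, by rw [hg]; exact h0⟩
    · exact (pv_zero_iff grid i (k + 1)).mpr ⟨by omega, by rw [hg]; exact h1⟩
  · rintro ⟨i, hi, k, hk, hz0, hz1⟩
    obtain ⟨hk0, h0⟩ := (pv_zero_iff grid i k).mp hz0
    obtain ⟨hk1, h1⟩ := (pv_zero_iff grid i (k + 1)).mp hz1
    exact ⟨grid.getD i [], pv_getD_mem grid i hi, k, by omega, by omega, h0, h1⟩

theorem pv_scans_small (m : Int) (grid : List (List Int)) (h : grid.length ≤ 1) :
    pvScanV m grid = false ∧ pvScanD m grid = false := by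
  rcases grid with _ | ⟨r, _ | ⟨r2, t⟩⟩
  · simp [pvScanV, pvScanD]
  · simp [pvScanV, pvScanD, List.range_succ]
  · simp at h

theorem pv_vany_small (w : Nat) (grid : List (List Int)) (h : grid.length ≤ 1) :
    ¬ pvVPair w grid := by
  rintro ⟨i, hi, j1, hj1, j2, hj2, a1, a2, hz0, hz1⟩
  have := pv_zero_lt grid (i + 1) j2 hz1
  omega

theorem pv_vin_vany (m : Int) (grid : List (List Int)) (h : pvVPair m.toNat grid) :
    pvVPair grid.flatten.length grid := by
  obtain ⟨i, hi, j1, hj1, j2, hj2, a1, a2, hz0, hz1⟩ := h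
  have hi1 := pv_zero_lt grid (i + 1) j2 hz1
  obtain ⟨hb0, -⟩ := (pv_zero_iff grid i j1).mp hz0
  obtain ⟨hb1, -⟩ := (pv_zero_iff grid (i + 1) j2).mp hz1
  have hl0 := pv_len_le grid i hi
  have hl1 := pv_len_le grid (i + 1) hi1
  exact ⟨i, hi, j1, by omega, j2, by omega, a1, a2, hz0, hz1⟩

theorem pv_vflat_to_m (m : Int) (grid : List (List Int))
    (hrect : ∀ row ∈ grid, (row.length : Int) = m)
    (h : pvVPair grid.flatten.length grid) : pvVPair m.toNat grid := by
  obtain ⟨i, hi, j1, hj1, j2, hj2, a1, a2, hz0, hz1⟩ := h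
  have hi1 := pv_zero_lt grid (i + 1) j2 hz1
  obtain ⟨hb0, -⟩ := (pv_zero_iff grid i j1).mp hz0
  obtain ⟨hb1, -⟩ := (pv_zero_iff grid (i + 1) j2).mp hz1
  have hr0 := hrect _ (pv_getD_mem grid i hi)
  have hr1 := hrect _ (pv_getD_mem grid (i + 1) hi1)
  exact ⟨i, hi, j1, by omega, j2, by omega, a1, a2, hz0, hz1⟩

theorem pv_scanVD_iff (m : Int) (grid : List (List Int))
    (hwide : ∀ row ∈ grid, m ≤ (row.length : Int)) :
    (pvScanV m grid || pvScanD m grid) = true ↔ pvVPair m.toNat grid := by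
  have hlen : ∀ i, i < grid.length → m ≤ ((grid.getD i []).length : Int) :=
    fun i hi => hwide _ (pv_getD_mem grid i hi)
  simp only [pvScanV, pvScanD, Bool.or_eq_true, List.any_eq_true,
    List.mem_range, Bool.and_eq_true, bne_iff_ne, beq_iff_eq,
    PySem.List.mem_pyRange_one]
  constructor
  · rintro (⟨i, hi, hne, j, ⟨hj0, hjm⟩, h0, h1⟩ | ⟨i, hi, hne, j, ⟨hj0, hjm⟩, hjne, hc⟩)
    · have hi1 : i + 1 < grid.length := by omega
      have hl0 := hlen i hi
      have hl1 := hlen (i + 1) hi1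
      rw [pv_pyGetD_nonneg _ _ hj0] at h0 h1
      exact ⟨i, hi, j.toNat, by omega, j.toNat, by omega, by omega, by omega,
        (pv_zero_iff grid i j.toNat).mpr ⟨by omega, h0⟩,
        (pv_zero_iff grid (i + 1) j.toNat).mpr ⟨by omega, h1⟩⟩
    · have hi1 : i + 1 < grid.length := by omega
      have hl0 := hlen i hi
      have hl1 := hlen (i + 1) hi1
      rcases hc with ⟨h0, h1⟩ | ⟨h0, h1⟩
      · rw [pv_pyGetD_nonneg _ _ (by omega : (0:Int) ≤ j + 1)] at h0
        rw [pv_pyGetD_nonneg _ _ hj0] at h1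
        exact ⟨i, hi, (j + 1).toNat, by omega, j.toNat, by omega, by omega, by omega,
          (pv_zero_iff grid i (j + 1).toNat).mpr ⟨by omega, h0⟩,
          (pv_zero_iff grid (i + 1) j.toNat).mpr ⟨by omega, h1⟩⟩
      · rw [pv_pyGetD_nonneg _ _ hj0] at h0
        rw [pv_pyGetD_nonneg _ _ (by omega : (0:Int) ≤ j + 1)] at h1
        exact ⟨i, hi, j.toNat, by omega, (j + 1).toNat, by omega, by omega, by omega,
          (pv_zero_iff grid i j.toNat).mpr ⟨by omega, h0⟩,
          (pv_zero_iff grid (i + 1) (j + 1).toNat).mpr ⟨by omega, h1⟩⟩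
  · rintro ⟨i, hi, j1, hj1, j2, hj2, a1, a2, hz0, hz1⟩
    have hi1 : i + 1 < grid.length := pv_zero_lt grid (i + 1) j2 hz1
    obtain ⟨hb0, h0⟩ := (pv_zero_iff grid i j1).mp hz0
    obtain ⟨hb1, h1⟩ := (pv_zero_iff grid (i + 1) j2).mp hz1
    have hc : j1 = j2 ∨ j1 + 1 = j2 ∨ j2 + 1 = j1 := by omega
    rcases hc with rfl | hadj | hadj
    · left
      refine ⟨i, hi, by omega, (j1 : Int), ⟨by omega, by omega⟩, ?_, ?_⟩
      · rw [pv_pyGetD_nonneg _ _ (by omega)]; simpa using h0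
      · rw [pv_pyGetD_nonneg _ _ (by omega)]; simpa using h1
    · -- j1 + 1 = j2 : second diagonal branch at j = j1
      right
      refine ⟨i, hi, by omega, (j1 : Int), ⟨by omega, by omega⟩, by omega,
        Or.inr ⟨?_, ?_⟩⟩
      · rw [pv_pyGetD_nonneg _ _ (by omega)]; simpa using h0
      · rw [pv_pyGetD_nonneg _ _ (by omega)]
        have e : ((j1 : Int) + 1).toNat = j2 := by omega
        rw [e]; exact h1
    · -- j2 + 1 = j1 : first diagonal branch at j = j2
      right
      refine ⟨i, hi, by omega, (j2 : Int), ⟨by omega, by omega⟩, by omega,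
        Or.inl ⟨?_, ?_⟩⟩
      · rw [pv_pyGetD_nonneg _ _ (by omega)]
        have e : ((j2 : Int) + 1).toNat = j1 := by omega
        rw [e]; exact h0
      · rw [pv_pyGetD_nonneg _ _ (by omega)]; simpa using h1

-- ===== B-side lemmas: bitmask characterisation =====

-- z has two adjacent set bits
def pvBitH (z : Nat) : Prop := ∃ j, z.testBit j ∧ z.testBit (j + 1)

-- current mask z has a set bit king-adjacent to a set bit of previous mask p
def pvBitV (p z : Nat) : Prop :=
  ∃ j, z.testBit j ∧ (p.testBit j ∨ (1 ≤ j ∧ p.testBit (j - 1)) ∨ p.testBit (j + 1))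

-- pvBitScan's result in mask terms
def pvMaskPair (rows : List (List Int)) : Prop :=
  (∃ i < rows.length, pvBitH (pvRowMask (rows.getD i []))) ∨
  (∃ i, i + 1 < rows.length ∧ pvBitV (pvRowMask (rows.getD i [])) (pvRowMask (rows.getD (i + 1) [])))

theorem pv_land_ne_zero (a b : Nat) : a &&& b ≠ 0 ↔ ∃ i, a.testBit i ∧ b.testBit i := by
  constructor
  · intro h
    obtain ⟨i, hi, -⟩ := Nat.exists_most_significant_bit h
    rw [Nat.testBit_land, Bool.and_eq_true] at hi
    exact ⟨i, hi.1, hi.2⟩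
  · rintro ⟨i, ha, hb⟩ h0
    have : (a &&& b).testBit i = true := by rw [Nat.testBit_land, ha, hb]; rfl
    rw [h0, Nat.zero_testBit] at this
    exact Bool.false_ne_true this

theorem pv_bitH_iff (z : Nat) : z &&& (z >>> 1) ≠ 0 ↔ pvBitH z := by
  rw [pv_land_ne_zero]
  constructor
  · rintro ⟨i, h1, h2⟩
    rw [Nat.testBit_shiftRight, Nat.add_comm] at h2
    exact ⟨i, h1, h2⟩
  · rintro ⟨j, h1, h2⟩
    refine ⟨j, h1, ?_⟩
    rw [Nat.testBit_shiftRight, Nat.add_comm]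
    exact h2

theorem pv_bitV_iff (p z : Nat) :
    z &&& (p ||| (p <<< 1) ||| (p >>> 1)) ≠ 0 ↔ pvBitV p z := by
  rw [pv_land_ne_zero]
  constructor
  · rintro ⟨i, h1, h2⟩
    rw [Nat.testBit_lor, Nat.testBit_lor, Nat.testBit_shiftLeft,
      Nat.testBit_shiftRight, Nat.add_comm] at h2
    refine ⟨i, h1, ?_⟩
    rcases Bool.or_eq_true_iff.mp h2 with h | h
    · rcases Bool.or_eq_true_iff.mp h with h | h
      · exact Or.inl h
      · rw [Bool.and_eq_true, decide_eq_true_eq] at h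
        exact Or.inr (Or.inl h)
    · exact Or.inr (Or.inr h)
  · rintro ⟨j, h1, h2⟩
    refine ⟨j, h1, ?_⟩
    rw [Nat.testBit_lor, Nat.testBit_lor, Nat.testBit_shiftLeft,
      Nat.testBit_shiftRight, Nat.add_comm]
    rcases h2 with h | ⟨hj, h⟩ | h
    · simp [h]
    · simp [hj, h]
    · simp [h]

theorem pv_rowMask_foldr (row : List Int) :
    pvRowMask row = row.foldr (fun v z => 2 * z + (if v = 0 then 1 else 0)) 0 := by
  rw [pvRowMask, List.foldl_reverse]

theorem pv_mask_testBit (row : List Int) (j : Nat) :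
    (pvRowMask row).testBit j = true ↔ j < row.length ∧ row.getD j 0 = 0 := by
  rw [pv_rowMask_foldr]
  induction row generalizing j with
  | nil => simp [Nat.zero_testBit]
  | cons v rest ih =>
    cases j with
    | zero =>
      simp only [List.foldr_cons, Nat.testBit_zero, List.length_cons, List.getD_cons_zero]
      constructor
      · intro h
        rw [decide_eq_true_eq] at h
        split at h
        · exact ⟨Nat.succ_pos _, by assumption⟩
        · omega
      · rintro ⟨-, hv⟩
        rw [decide_eq_true_eq, if_pos hv]
        omega
    | succ k =>
      rw [List.foldr_cons, Nat.testBit_add_one]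
      have hdiv : (2 * (rest.foldr (fun v z => 2 * z + (if v = 0 then 1 else 0)) 0)
          + (if v = 0 then 1 else 0)) / 2
          = rest.foldr (fun v z => 2 * z + (if v = 0 then 1 else 0)) 0 := by
        split <;> omega
      rw [hdiv, ih k]
      simp

theorem pv_bit_zero (grid : List (List Int)) (i j : Nat) :
    (pvRowMask (grid.getD i [])).testBit j = true ↔ pvZero grid i j := by
  rw [pv_mask_testBit, pv_zero_iff]

theorem pv_maskPair_nil : ¬ pvMaskPair [] := by
  rintro (⟨i, hi, -⟩ | ⟨i, hi, -⟩) <;> simp at hi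

theorem pv_maskPair_cons (row : List Int) (rest : List (List Int)) :
    pvMaskPair (row :: rest) ↔
      pvBitH (pvRowMask row) ∨
      (∃ r0 ∈ rest.head?, pvBitV (pvRowMask row) (pvRowMask r0)) ∨
      pvMaskPair rest := by
  constructor
  · rintro (⟨i, hi, hH⟩ | ⟨i, hi, hV⟩)
    · cases i with
      | zero => exact Or.inl (by simpa using hH)
      | succ k =>
        refine Or.inr (Or.inr (Or.inl ⟨k, by simpa using hi, ?_⟩))
        simpa using hH
    · cases i with
      | zero =>
        refine Or.inr (Or.inl ?_)
        cases rest with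
        | nil => simp at hi
        | cons r0 t =>
          exact ⟨r0, by simp, by simpa using hV⟩
      | succ k =>
        refine Or.inr (Or.inr (Or.inr ⟨k, by simpa using hi, ?_⟩))
        simpa using hV
  · rintro (hH | ⟨r0, hr0, hV⟩ | ⟨i, hi, h⟩ | ⟨i, hi, h⟩)
    · exact Or.inl ⟨0, by simp, by simpa using hH⟩
    · cases rest with
      | nil => simp at hr0
      | cons r0' t =>
        simp only [List.head?_cons, Option.mem_def, Option.some.injEq] at hr0
        subst hr0
        exact Or.inr ⟨0, by simp, by simpa using hV⟩
    · exact Or.inl ⟨i + 1, by simpa using hi, by simpa using h⟩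
    · exact Or.inr ⟨i + 1, by simpa using hi, by simpa using h⟩

theorem pv_bitScan_iff (rows : List (List Int)) (p : Nat) :
    pvBitScan p rows = true ↔
      (∃ r0 ∈ rows.head?, pvBitV p (pvRowMask r0)) ∨ pvMaskPair rows := by
  induction rows generalizing p with
  | nil =>
    simp only [pvBitScan, List.head?_nil]
    constructor
    · intro h; exact absurd h Bool.false_ne_true
    · rintro (⟨r0, hr0, -⟩ | h)
      · simp at hr0
      · exact absurd h pv_maskPair_nil
  | cons row rest ih =>
    rw [pv_maskPair_cons]
    show (if pvRowMask row &&& (pvRowMask row >>> 1) ≠ 0 then true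
      else if pvRowMask row &&& (p ||| (p <<< 1) ||| (p >>> 1)) ≠ 0 then true
      else pvBitScan (pvRowMask row) rest) = true ↔ _
    split_ifs with h1 h2
    · have := (pv_bitH_iff _).mp h1
      simp only [true_iff]
      exact Or.inr (Or.inl this)
    · have := (pv_bitV_iff _ _).mp h2
      simp only [true_iff, List.head?_cons]
      exact Or.inl ⟨row, rfl, this⟩
    · rw [ih]
      constructor
      · rintro (⟨r0, hr0, hV⟩ | h)
        · exact Or.inr (Or.inr (Or.inl ⟨r0, hr0, hV⟩))
        · exact Or.inr (Or.inr (Or.inr h))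
      · rintro (hP | hH | hV | h)
        · rcases hP with ⟨r0, hr0, hV0⟩
          simp only [List.head?_cons, Option.mem_def, Option.some.injEq] at hr0
          subst hr0
          exact absurd ((pv_bitV_iff _ _).mpr hV0) h2
        · exact absurd ((pv_bitH_iff _).mpr hH) h1
        · exact Or.inl hV
        · exact Or.inr h

theorem pv_maskPair_iff (grid : List (List Int)) :
    pvMaskPair grid ↔ pvHPair grid ∨ pvVPair grid.flatten.length grid := by
  constructor
  · rintro (⟨i, hi, j, hz0, hz1⟩ | ⟨i, hi, j, hz, hadj⟩)
    · left
      have h0 := (pv_bit_zero grid i j).mp hz0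
      have h1 := (pv_bit_zero grid i (j + 1)).mp hz1
      obtain ⟨hb, -⟩ := (pv_zero_iff grid i j).mp h0
      have hle := pv_len_le grid i hi
      exact ⟨i, hi, j, by omega, h0, h1⟩
    · right
      have hz' := (pv_bit_zero grid (i + 1) j).mp hz
      obtain ⟨hb1, -⟩ := (pv_zero_iff grid (i + 1) j).mp hz'
      have hl1 := pv_len_le grid (i + 1) hi
      have hi' : i < grid.length := by omega
      have hl0 := pv_len_le grid i hi'
      rcases hadj with h | ⟨hj, h⟩ | h
      · have h0 := (pv_bit_zero grid i j).mp h
        obtain ⟨hb0, -⟩ := (pv_zero_iff grid i j).mp h0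
        exact ⟨i, hi', j, by omega, j, by omega, by omega, by omega, h0, hz'⟩
      · have h0 := (pv_bit_zero grid i (j - 1)).mp h
        obtain ⟨hb0, -⟩ := (pv_zero_iff grid i (j - 1)).mp h0
        exact ⟨i, hi', j - 1, by omega, j, by omega, by omega, by omega, h0, hz'⟩
      · have h0 := (pv_bit_zero grid i (j + 1)).mp h
        obtain ⟨hb0, -⟩ := (pv_zero_iff grid i (j + 1)).mp h0
        exact ⟨i, hi', j + 1, by omega, j, by omega, by omega, by omega, h0, hz'⟩
  · rintro (⟨i, hi, k, hk, hz0, hz1⟩ | ⟨i, hi, j1, hj1, j2, hj2, a1, a2, hz0, hz1⟩)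
    · exact Or.inl ⟨i, hi, k, (pv_bit_zero grid i k).mpr hz0,
        (pv_bit_zero grid i (k + 1)).mpr hz1⟩
    · right
      have hi1 : i + 1 < grid.length := pv_zero_lt grid (i + 1) j2 hz1
      refine ⟨i, hi1, j2, (pv_bit_zero grid (i + 1) j2).mpr hz1, ?_⟩
      have hc : j1 = j2 ∨ j1 + 1 = j2 ∨ j2 + 1 = j1 := by omega
      rcases hc with hadj | hadj | hadj
      · exact Or.inl ((pv_bit_zero grid i j2).mpr (hadj ▸ hz0))
      · -- j1 + 1 = j2, so j1 = j2 - 1 and 1 ≤ j2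
        refine Or.inr (Or.inl ⟨by omega, ?_⟩)
        have e : j2 - 1 = j1 := by omega
        rw [e]
        exact (pv_bit_zero grid i j1).mpr hz0
      · -- j2 + 1 = j1
        refine Or.inr (Or.inr ?_)
        have e : j2 + 1 = j1 := hadj
        rw [e]
        exact (pv_bit_zero grid i j1).mpr hz0

theorem pv_bitScan_zero (grid : List (List Int)) :
    pvBitScan 0 grid = true ↔ pvHPair grid ∨ pvVPair grid.flatten.length grid := by
  rw [pv_bitScan_iff, pv_maskPair_iff]
  constructor
  · rintro (⟨r0, -, j, -, h⟩ | h)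
    · rcases h with h | ⟨-, h⟩ | h <;> rw [Nat.zero_testBit] at h <;> exact absurd h Bool.false_ne_true
    · exact h
  · exact Or.inr

theorem pv_main (n : Int) (m : Int) (grid : List (List Int))
    (hpre : Pre_solve n m grid) :
    solve n m grid = solve_alt n m grid := by
  unfold solve solve_alt
  rw [pv_sum_eq, pv_sum_eq_b]
  by_cases h1 : grid.flatten.sum = n * m
  · simp [h1]
  by_cases h2 : grid.flatten.sum = 0
  · simp [h2]
  simp only [if_neg h1, if_neg h2]
  by_cases hH : pvHPair grid
  · rw [(pv_scanH_iff grid).mpr hH, (pv_bitScan_zero grid).mpr (Or.inl hH)]; simp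
  · have hHf : pvScanH grid = false := by
      rw [← Bool.not_eq_true]; intro h; exact hH ((pv_scanH_iff grid).mp h)
    by_cases hsmall : grid.length ≤ 1
    · obtain ⟨hv, hd⟩ := pv_scans_small m grid hsmall
      have hB : pvBitScan 0 grid = false := by
        rw [← Bool.not_eq_true]; intro h
        rcases (pv_bitScan_zero grid).mp h with h' | h'
        · exact hH h'
        · exact pv_vany_small _ grid hsmall h'
      rw [hHf, hv, hd, hB]; simp
    · have hkey : (∀ row ∈ grid, m ≤ (row.length : Int)) ∧
          (pvVPair m.toNat grid ∨ ¬ pvVPair grid.flatten.length grid) := by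
        rcases hpre with h | h | h | h | h | h
        · exact absurd h h1
        · exact absurd h h2
        · exact absurd h hsmall
        · exact absurd h hH
        · refine ⟨fun row hr => le_of_eq (h row hr).symm, ?_⟩
          by_cases hVin : pvVPair m.toNat grid
          · exact Or.inl hVin
          · exact Or.inr (fun hva => hVin (pv_vflat_to_m m grid h hva))
        · exact h
      obtain ⟨hwide, hVor⟩ := hkey
      by_cases hVin : pvVPair m.toNat grid
      · have hVD := (pv_scanVD_iff m grid hwide).mpr hVin
        have hB := (pv_bitScan_zero grid).mpr (Or.inr (pv_vin_vany m grid hVin))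
        rcases Bool.or_eq_true_iff.mp hVD with hv | hv <;> simp [hHf, hv, hB]
      · have hVany : ¬ pvVPair grid.flatten.length grid := by
          rcases hVor with h | h
          · exact absurd h hVin
          · exact h
        have hor : (pvScanV m grid || pvScanD m grid) = false := by
          rw [← Bool.not_eq_true]; intro h
          exact hVin ((pv_scanVD_iff m grid hwide).mp h)
        obtain ⟨hv, hd⟩ := Bool.or_eq_false_iff.mp hor
        have hB : pvBitScan 0 grid = false := by
          rw [← Bool.not_eq_true]; intro h
          rcases (pv_bitScan_zero grid).mp h with h' | h'
          · exact hH h'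
          · exact hVany h'
        rw [hHf, hv, hd, hB]; simp

-- ===== VERDICT (by name: the statement is the Claim_ definition above) =====
theorem solve_spec : Claim_equal_solve := by
  intro n m grid _ hpre
  exact pv_main n m grid hpre
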